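-- pv_equiv track=rewrite | github.com/lolospolo29/AutomatedTrading | app/helper/calculator/framework/structure/Choch.py | is_bearish_fractal
-- ===== SOURCE A (Python) =====
-- def is_bearish_fractal(lows: list, index: int, lookback: int) -> bool:
--     """Check if there is a bearish fractal at the given index (local low)"""
--     p = lookback // 2
--     if index < p or index >= len(lows) - p:
--         return False
--     # Check if it's a local minimum
--     for i in range(1, p + 1):
--         if lows[index] >= lows[index - i] or lows[index] >= lows[index + i]:
--             return False
--     return True
-- ===== SOURCE B (Python) =====
-- def is_bearish_fractal(lows: list, index: int, lookback: int) -> bool: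
--     """Check if there is a bearish fractal at the given index (local low)"""
--     p = lookback // 2
--     if index < p or index >= len(lows) - p:
--         return False
--     window = lows[index - p:index + p + 1]
--     return lows[index] == min(window) and window.count(lows[index]) == 1
-- ===== Notes on version B (the rewrite author's own statement) =====
-- stated objective: alternative
-- what changed: Replaces A's pairwise strict-comparison loop over neighbour offsets by the unique-minimum characterisation: slice the whole window and test that the centre equals min(window) and occurs exactly once in it.
-- outside the precondition, e.g. on is_bearish_fractal([0, 1], -1, -2): A returns True, B returns False
import Mathlib
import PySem

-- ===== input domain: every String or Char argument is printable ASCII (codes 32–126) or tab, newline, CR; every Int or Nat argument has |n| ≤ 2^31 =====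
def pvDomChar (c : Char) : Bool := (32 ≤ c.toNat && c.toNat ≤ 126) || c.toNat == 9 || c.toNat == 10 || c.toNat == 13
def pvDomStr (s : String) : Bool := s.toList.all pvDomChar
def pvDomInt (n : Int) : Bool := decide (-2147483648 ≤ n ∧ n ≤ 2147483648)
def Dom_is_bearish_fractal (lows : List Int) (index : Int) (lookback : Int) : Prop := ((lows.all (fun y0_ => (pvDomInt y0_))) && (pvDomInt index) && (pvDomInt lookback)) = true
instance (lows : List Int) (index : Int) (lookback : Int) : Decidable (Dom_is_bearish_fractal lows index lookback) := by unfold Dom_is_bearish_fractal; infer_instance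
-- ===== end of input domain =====

-- B replaces A's pairwise strict-comparison neighbour loop by the unique-minimum test on the whole window (objective: alternative).


-- ===== PORT A =====
-- the 'for i in range(1, p+1)' loop with its early 'return False'
def bearLoopA (lows : List Int) (index : Int) : List Int → Bool
  | [] => true
  | i :: rest =>
    if PySem.List.pyGetD lows (index - i) 0 ≤ PySem.List.pyGetD lows index 0 ∨
       PySem.List.pyGetD lows (index + i) 0 ≤ PySem.List.pyGetD lows index 0 then false
    else bearLoopA lows index rest

-- pyGetD is exact here: under Pre_ every index the loop touches is in range (the guard ensures it)
def is_bearish_fractal (lows : List Int) (index : Int) (lookback : Int) : Bool :=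
  let p := PySem.Int.floordiv lookback 2
  if index < p ∨ (lows.length : Int) - p ≤ index then false
  else bearLoopA lows index (PySem.List.pyRange 1 (p + 1) 1)

-- ===== PORT B =====
-- min(window) is total here: under Pre_ the window always contains the centre element, so min? ≠ none
def is_bearish_fractal_alt (lows : List Int) (index : Int) (lookback : Int) : Bool :=
  let p := PySem.Int.floordiv lookback 2
  if index < p ∨ (lows.length : Int) - p ≤ index then false
  else
    let c := PySem.List.pyGetD lows index 0
    let window := PySem.List.slice lows (some (index - p)) (some (index + p + 1))
    (PySem.List.min? window (fun x => x) == some c) && (PySem.List.count window c == 1)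

-- ===== PRECONDITION & SPEC =====
-- Pre_ excludes negative lookback on inputs that pass the bounds guard (outside the function's natural
-- domain): there A's unconditional True from the empty range is an accident and B's whole-window slice
-- is empty or misaligned, so min() raises or B disagrees.
def Pre_is_bearish_fractal (lows : List Int) (index : Int) (lookback : Int) : Prop :=
  0 ≤ lookback ∨ index < PySem.Int.floordiv lookback 2 ∨
    (lows.length : Int) - PySem.Int.floordiv lookback 2 ≤ index
instance (lows : List Int) (index : Int) (lookback : Int) : Decidable (Pre_is_bearish_fractal lows index lookback) := by unfold Pre_is_bearish_fractal; infer_instance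
def pvWitness_is_bearish_fractal : List Int × Int × Int := ([2, 1, 3], 1, 2)

def Spec_is_bearish_fractal (lows : List Int) (index : Int) (lookback : Int) (out : Bool) : Prop := out = is_bearish_fractal_alt lows index lookback
instance (lows : List Int) (index : Int) (lookback : Int) (out : Bool) : Decidable (Spec_is_bearish_fractal lows index lookback out) := by unfold Spec_is_bearish_fractal; infer_instance

-- ===== CLAIM (what is proved, stated in full; the proofs are below) =====
def Claim_equal_is_bearish_fractal : Prop := ∀ (lows : List Int) (index : Int) (lookback : Int), Dom_is_bearish_fractal lows index lookback → Pre_is_bearish_fractal lows index lookback → Spec_is_bearish_fractal lows index lookback (is_bearish_fractal lows index lookback)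

-- ===== LEMMAS AND PROOFS =====
lemma bearLoopA_eq_all (lows : List Int) (index : Int) (l : List Int) :
    bearLoopA lows index l = l.all (fun i =>
      decide (PySem.List.pyGetD lows index 0 < PySem.List.pyGetD lows (index - i) 0 ∧
              PySem.List.pyGetD lows index 0 < PySem.List.pyGetD lows (index + i) 0)) := by
  induction l with
  | nil => rfl
  | cons i rest ih =>
    simp only [bearLoopA, ih, List.all_cons]
    by_cases h : PySem.List.pyGetD lows (index - i) 0 ≤ PySem.List.pyGetD lows index 0 ∨
                 PySem.List.pyGetD lows (index + i) 0 ≤ PySem.List.pyGetD lows index 0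
    · rw [if_pos h]
      have hnot : ¬ (PySem.List.pyGetD lows index 0 < PySem.List.pyGetD lows (index - i) 0 ∧
          PySem.List.pyGetD lows index 0 < PySem.List.pyGetD lows (index + i) 0) := by omega
      simp [hnot]
    · rw [if_neg h]
      push_neg at h
      simp [h.1, h.2]

-- every element of the slice xs[u:v] (0 ≤ u ≤ v ≤ len) is lows[j] for a j in [u, v), and conversely
lemma mem_slice_iff (lows : List Int) (u v : Int) (hu : 0 ≤ u) (huv : u ≤ v)
    (hv : v ≤ (lows.length : Int)) (x : Int) :
    x ∈ PySem.List.slice lows (some u) (some v) ↔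
      ∃ j : Int, u ≤ j ∧ j < v ∧ x = PySem.List.pyGetD lows j 0 := by
  rw [PySem.List.slice_toNat lows hu (by omega : (0:Int) ≤ v)]
  constructor
  · intro hx
    rw [List.mem_iff_getElem] at hx
    obtain ⟨k, hk, hxk⟩ := hx
    rw [List.length_take, List.length_drop] at hk
    rw [List.getElem_take, List.getElem_drop] at hxk
    refine ⟨u + k, by omega, by omega, ?_⟩
    rw [PySem.List.pyGetD_eq_getElem lows (i := u + k) 0 (by omega) (by omega)]
    rw [← hxk]; congr 1; omega
  · rintro ⟨j, hj1, hj2, rfl⟩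
    rw [List.mem_iff_getElem]
    refine ⟨j.toNat - u.toNat, by rw [List.length_take, List.length_drop]; omega, ?_⟩
    rw [List.getElem_take, List.getElem_drop]
    rw [PySem.List.pyGetD_eq_getElem lows (i := j) 0 (by omega) (by omega)]
    congr 1; omega

-- xs[u:w] = xs[u:v] ++ xs[v:w] for 0 ≤ u ≤ v ≤ w
lemma slice_split (lows : List Int) (u v w : Int) (hu : 0 ≤ u) (huv : u ≤ v) (hvw : v ≤ w) :
    PySem.List.slice lows (some u) (some w) =
      PySem.List.slice lows (some u) (some v) ++ PySem.List.slice lows (some v) (some w) := by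
  rw [PySem.List.slice_toNat lows hu (by omega : (0:Int) ≤ w),
      PySem.List.slice_toNat lows hu (by omega : (0:Int) ≤ v),
      PySem.List.slice_toNat lows (by omega : (0:Int) ≤ v) (by omega : (0:Int) ≤ w)]
  have h1 : w.toNat - u.toNat = (v.toNat - u.toNat) + (w.toNat - v.toNat) := by omega
  rw [h1, List.take_add, List.drop_drop]
  have h2 : u.toNat + (v.toNat - u.toNat) = v.toNat := by omega
  rw [h2]

-- xs[v:v+1] = [xs[v]] when v is in range
lemma slice_singleton (lows : List Int) (v : Int) (hv : 0 ≤ v) (hvl : v < (lows.length : Int)) :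
    PySem.List.slice lows (some v) (some (v + 1)) = [PySem.List.pyGetD lows v 0] := by
  rw [PySem.List.slice_toNat lows hv (by omega : (0:Int) ≤ v + 1)]
  have hlt : v.toNat < lows.length := by omega
  rw [List.drop_eq_getElem_cons hlt]
  have h1 : (v + 1).toNat - v.toNat = 1 := by omega
  rw [h1, List.take_succ_cons, List.take_zero]
  rw [PySem.List.pyGetD_eq_getElem lows (i := v) 0 (by omega) (by omega)]

-- min? xs id = some c given c ∈ xs and c ≤ everything
lemma min?_eq_some_iff (xs : List Int) (c : Int) (hc : c ∈ xs) :
    PySem.List.min? xs (fun x => x) = some c ↔ ∀ x ∈ xs, c ≤ x := by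
  constructor
  · intro h x hx
    exact PySem.List.min?_isMin h x hx
  · intro h
    cases hmin : PySem.List.min? xs (fun x => x) with
    | none =>
      rw [PySem.List.min?_eq_none_iff] at hmin
      subst hmin; cases hc
    | some m =>
      have hm := PySem.List.min?_mem hmin
      have h1 : m ≤ c := PySem.List.min?_isMin hmin c hc
      have h2 : c ≤ m := h m hm
      rw [le_antisymm h1 h2]

-- ===== VERDICT (by name: the statement is the Claim_ definition above) =====
theorem is_bearish_fractal_spec : Claim_equal_is_bearish_fractal := by
  intro lows index lookback _ hpre
  unfold Spec_is_bearish_fractal is_bearish_fractal is_bearish_fractal_alt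
  simp only []
  set p := PySem.Int.floordiv lookback 2 with hpdef
  by_cases hg : index < p ∨ (lows.length : Int) - p ≤ index
  · rw [if_pos hg, if_pos hg]
  · rw [if_neg hg, if_neg hg]
    push_neg at hg
    obtain ⟨h1, h2⟩ := hg
    have hlb : 0 ≤ lookback := by
      unfold Pre_is_bearish_fractal at hpre
      rw [← hpdef] at hpre
      rcases hpre with h | h | h
      · exact h
      · omega
      · omega
    have hp : 0 ≤ p := by
      rw [hpdef, PySem.Int.floordiv_eq_ediv_of_pos (by omega)]
      exact Int.ediv_nonneg hlb (by omega)
    set c := PySem.List.pyGetD lows index 0 with hcdef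
    -- decompose the window into left slice, centre, right slice
    have hwin : PySem.List.slice lows (some (index - p)) (some (index + p + 1)) =
        PySem.List.slice lows (some (index - p)) (some index) ++
          c :: PySem.List.slice lows (some (index + 1)) (some (index + p + 1)) := by
      rw [slice_split lows (index - p) index (index + p + 1) (by omega) (by omega) (by omega),
          slice_split lows index (index + 1) (index + p + 1) (by omega) (by omega) (by omega),
          slice_singleton lows index (by omega) (by omega)]
      simp [← hcdef]
    rw [hwin]
    set L := PySem.List.slice lows (some (index - p)) (some index) with hLdef
    set R := PySem.List.slice lows (some (index + 1)) (some (index + p + 1)) with hRdef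
    have hcmem : c ∈ L ++ c :: R := by simp
    rw [Bool.eq_iff_iff, Bool.and_eq_true, beq_iff_eq, beq_iff_eq,
        min?_eq_some_iff _ c hcmem, PySem.List.count_eq,
        bearLoopA_eq_all, List.all_eq_true]
    have hcount : (L ++ c :: R).count c = L.count c + R.count c + 1 := by
      rw [List.count_append, List.count_cons_self]; omega
    constructor
    · -- A true → B true
      intro h
      have hkey : (∀ x ∈ L, c < x) ∧ (∀ x ∈ R, c < x) := by
        constructor
        · intro x hx
          rw [hLdef, mem_slice_iff lows _ _ (by omega) (by omega) (by omega)] at hx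
          obtain ⟨j, hj1, hj2, rfl⟩ := hx
          have := h (index - j) (by rw [PySem.List.mem_pyRange_one]; omega)
          simp only [decide_eq_true_eq] at this
          have h' := this.1
          rwa [show index - (index - j) = j by ring] at h'
        · intro x hx
          rw [hRdef, mem_slice_iff lows _ _ (by omega) (by omega) (by omega)] at hx
          obtain ⟨j, hj1, hj2, rfl⟩ := hx
          have := h (j - index) (by rw [PySem.List.mem_pyRange_one]; omega)
          simp only [decide_eq_true_eq] at this
          have h' := this.2
          rwa [show index + (j - index) = j by ring] at h'
      constructor
      · intro x hx
        rcases List.mem_append.mp hx with hx | hx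
        · exact le_of_lt (hkey.1 x hx)
        · rcases List.mem_cons.mp hx with rfl | hx
          · exact le_refl _
          · exact le_of_lt (hkey.2 x hx)
      · have hL0 : L.count c = 0 := by
          rw [List.count_eq_zero]
          intro hmem; exact absurd rfl (ne_of_gt (hkey.1 c hmem))
        have hR0 : R.count c = 0 := by
          rw [List.count_eq_zero]
          intro hmem; exact absurd rfl (ne_of_gt (hkey.2 c hmem))
        omega
    · -- B true → A true
      rintro ⟨hle, hcnt⟩ i hi
      rw [PySem.List.mem_pyRange_one] at hi
      have hL0 : L.count c = 0 := by omega
      have hR0 : R.count c = 0 := by omega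
      rw [List.count_eq_zero] at hL0 hR0
      have hstrict : ∀ x, (x ∈ L ∨ x ∈ R) → c < x := by
        intro x hx
        have hle' : c ≤ x := by
          apply hle
          rcases hx with hx | hx
          · exact List.mem_append.mpr (Or.inl hx)
          · exact List.mem_append.mpr (Or.inr (List.mem_cons_of_mem _ hx))
        rcases eq_or_lt_of_le hle' with rfl | hlt
        · rcases hx with hx | hx
          · exact absurd hx hL0
          · exact absurd hx hR0
        · exact hlt
      simp only [decide_eq_true_eq]
      constructor
      · apply hstrict
        left
        rw [hLdef, mem_slice_iff lows _ _ (by omega) (by omega) (by omega)]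
        exact ⟨index - i, by omega, by omega, rfl⟩
      · apply hstrict
        right
        rw [hRdef, mem_slice_iff lows _ _ (by omega) (by omega) (by omega)]
        exact ⟨index + i, by omega, by omega, rfl⟩
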